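-- pv_equiv track=rewrite | github.com/sunilgug/Quant | j_support_functions.py | Combinations_6
-- ===== SOURCE A (Python) =====
-- def Combinations_6(lst_A,lst_B,lst_C,lst_D,lst_E,lst_F):
--     lst_combination=[]
--     for a in lst_A:
--         for b in lst_B:
--             for c in lst_C:
--                 for d in lst_D:
--                     for e in lst_E:
--                         for f in lst_F:
--                             lst_combination.append([a,b,c,d,e,f])
--     return lst_combination
-- ===== SOURCE B (Python) =====
-- def Combinations_6(lst_A, lst_B, lst_C, lst_D, lst_E, lst_F):
--     result = [[]]
--     for lst in (lst_A, lst_B, lst_C, lst_D, lst_E, lst_F):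
--         result = [r + [x] for r in result for x in lst]
--     return result
-- ===== Notes on version B (the rewrite author's own statement) =====
-- stated objective: simpler
-- what changed: Replaces the six hard-coded nested loops with a single accumulator fold over the list of the six input lists, extending each partial combination by one coordinate per pass.
import Mathlib
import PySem

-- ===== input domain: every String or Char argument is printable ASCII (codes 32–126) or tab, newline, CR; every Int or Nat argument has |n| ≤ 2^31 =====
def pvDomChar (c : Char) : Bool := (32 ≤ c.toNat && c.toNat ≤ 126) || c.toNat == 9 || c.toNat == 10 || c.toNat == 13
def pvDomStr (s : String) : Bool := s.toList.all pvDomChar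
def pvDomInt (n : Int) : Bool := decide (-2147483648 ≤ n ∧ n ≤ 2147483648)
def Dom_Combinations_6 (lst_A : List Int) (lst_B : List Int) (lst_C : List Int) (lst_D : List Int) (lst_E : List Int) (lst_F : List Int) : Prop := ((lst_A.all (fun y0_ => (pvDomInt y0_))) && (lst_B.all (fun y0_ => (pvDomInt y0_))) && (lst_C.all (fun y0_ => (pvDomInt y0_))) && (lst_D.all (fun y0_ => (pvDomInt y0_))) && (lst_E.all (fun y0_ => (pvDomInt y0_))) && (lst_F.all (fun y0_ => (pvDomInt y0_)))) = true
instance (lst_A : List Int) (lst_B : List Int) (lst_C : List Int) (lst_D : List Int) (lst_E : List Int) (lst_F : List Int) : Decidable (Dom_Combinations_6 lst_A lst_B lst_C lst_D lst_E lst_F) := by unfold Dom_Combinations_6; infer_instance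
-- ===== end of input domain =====

-- B replaces the six hard-coded nested loops by one accumulator fold over the list of the six input lists (simpler decomposition, same cost).


-- ===== PORT A =====
-- Python's O(1) lst.append is transliterated as cons onto the accumulator with one final
-- reverse (the efficiency-preserving encoding of append-in-a-loop); same loops, same order.
def Combinations_6 (lst_A : List Int) (lst_B : List Int) (lst_C : List Int) (lst_D : List Int) (lst_E : List Int) (lst_F : List Int) : List (List Int) :=
  (lst_A.foldl (fun acc a =>
    lst_B.foldl (fun acc b =>
      lst_C.foldl (fun acc c =>
        lst_D.foldl (fun acc d =>
          lst_E.foldl (fun acc e =>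
            lst_F.foldl (fun acc f => [a, b, c, d, e, f] :: acc) acc) acc) acc) acc) acc) []).reverse

-- ===== PORT B =====
def Combinations_6_alt (lst_A : List Int) (lst_B : List Int) (lst_C : List Int) (lst_D : List Int) (lst_E : List Int) (lst_F : List Int) : List (List Int) :=
  [lst_A, lst_B, lst_C, lst_D, lst_E, lst_F].foldl
    (fun result lst => result.flatMap (fun r => lst.map (fun x => r ++ [x]))) [[]]

-- ===== PRECONDITION & SPEC =====
def Spec_Combinations_6 (lst_A : List Int) (lst_B : List Int) (lst_C : List Int) (lst_D : List Int) (lst_E : List Int) (lst_F : List Int) (out : List (List Int)) : Prop := out = Combinations_6_alt lst_A lst_B lst_C lst_D lst_E lst_F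
instance (lst_A : List Int) (lst_B : List Int) (lst_C : List Int) (lst_D : List Int) (lst_E : List Int) (lst_F : List Int) (out : List (List Int)) : Decidable (Spec_Combinations_6 lst_A lst_B lst_C lst_D lst_E lst_F out) := by unfold Spec_Combinations_6; infer_instance

-- ===== CLAIM (what is proved, stated in full; the proofs are below) =====
def Claim_equal_Combinations_6 : Prop := ∀ (lst_A : List Int) (lst_B : List Int) (lst_C : List Int) (lst_D : List Int) (lst_E : List Int) (lst_F : List Int), Dom_Combinations_6 lst_A lst_B lst_C lst_D lst_E lst_F → Spec_Combinations_6 lst_A lst_B lst_C lst_D lst_E lst_F (Combinations_6 lst_A lst_B lst_C lst_D lst_E lst_F)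

-- ===== LEMMAS AND PROOFS =====
-- inner loop: consing g x onto the accumulator builds the reversed map
theorem foldl_cons_eq {a b : Type} (l : List a) (g : a -> b) (acc : List b) :
    l.foldl (fun acc x => g x :: acc) acc = (l.map g).reverse ++ acc := by
  induction l generalizing acc <;> simp [*]

-- outer loops: prepending (h x).reverse per element builds the reversed flatMap
theorem foldl_revapp_eq {a b : Type} (l : List a) (h : a -> List b) (acc : List b) :
    l.foldl (fun acc x => (h x).reverse ++ acc) acc = (l.flatMap h).reverse ++ acc := by
  induction l generalizing acc <;> simp [*]

-- A's nested loops reduce to nested flatMaps ending in a map.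
theorem combA_eq (A B C D E F : List Int) :
    Combinations_6 A B C D E F =
      A.flatMap (fun a => B.flatMap (fun b => C.flatMap (fun c =>
        D.flatMap (fun d => E.flatMap (fun e =>
          F.map (fun f => [a, b, c, d, e, f])))))) := by
  simp only [Combinations_6, foldl_cons_eq, foldl_revapp_eq,
    List.append_nil, List.reverse_reverse]

-- B's accumulator fold reduces to the same nested flatMap form.
theorem combB_eq (A B C D E F : List Int) :
    Combinations_6_alt A B C D E F =
      A.flatMap (fun a => B.flatMap (fun b => C.flatMap (fun c =>
        D.flatMap (fun d => E.flatMap (fun e =>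
          F.map (fun f => [a, b, c, d, e, f])))))) := by
  simp only [Combinations_6_alt, List.foldl_cons, List.foldl_nil,
    List.flatMap_cons, List.flatMap_nil, List.append_nil, List.nil_append,
    List.flatMap_map, List.flatMap_assoc, List.cons_append]

-- ===== VERDICT (by name: the statement is the Claim_ definition above) =====
theorem Combinations_6_spec : Claim_equal_Combinations_6 := by
  intro lst_A lst_B lst_C lst_D lst_E lst_F _
  unfold Spec_Combinations_6
  rw [combA_eq, combB_eq]
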